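-- pv_equiv track=rewrite | github.com/balart40/code-practice | visage-livre/Kaitenzushi/solution_Kaitenzushi.py | getMaximumEatenDishCount
-- ===== SOURCE A (Python) =====
-- from typing import List
-- from collections import deque
--
-- def getMaximumEatenDishCount(N: int, D: List[int], K: int) -> int:
--     counter = 0
--     queue = deque()
--     eaten = dict()
--
--     for sushi in D:
--         if sushi in eaten:
--             continue
--         else:
--             counter += 1
--             queue.append(sushi)
--             if len(queue) > K:
--                 to_remove = queue.popleft()
--                 del eaten[to_remove]
--             eaten[sushi] = True
--     return counter
-- ===== SOURCE B (Python) =====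
-- from typing import List
--
--
-- def getMaximumEatenDishCount(N: int, D: List[int], K: int) -> int:
--     eaten_count = 0
--     last_eaten = {}
--     for sushi in D:
--         if sushi in last_eaten and last_eaten[sushi] > eaten_count - K:
--             continue
--         eaten_count += 1
--         last_eaten[sushi] = eaten_count
--     return eaten_count
-- ===== Notes on version B (the rewrite author's own statement) =====
-- stated objective: simpler
-- what changed: Replaces the deque sliding window plus membership dict by a single counter with a last-eaten-timestamp dict (a dish is blocked iff its last-eaten index exceeds eaten_count - K); the queue and its eviction branch disappear.
import Mathlib
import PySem

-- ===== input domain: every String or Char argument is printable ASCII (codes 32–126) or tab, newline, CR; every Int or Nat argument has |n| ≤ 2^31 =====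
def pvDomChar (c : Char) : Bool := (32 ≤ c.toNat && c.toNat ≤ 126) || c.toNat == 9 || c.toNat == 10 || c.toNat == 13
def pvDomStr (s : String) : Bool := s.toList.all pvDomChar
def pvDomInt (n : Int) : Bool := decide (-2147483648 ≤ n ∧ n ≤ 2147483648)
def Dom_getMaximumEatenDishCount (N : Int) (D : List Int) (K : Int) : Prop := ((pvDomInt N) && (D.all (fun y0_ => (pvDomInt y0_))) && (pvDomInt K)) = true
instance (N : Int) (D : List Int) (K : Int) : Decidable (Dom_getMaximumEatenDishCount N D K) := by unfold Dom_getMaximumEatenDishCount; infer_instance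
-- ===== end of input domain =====

-- B drops A's deque window + membership dict for a counter with last-eaten timestamps (simpler; same cost).

-- ===== PORT A =====
-- loop body of A: skip if in eaten, else count, append to the queue, evict the oldest when over K, record
def aStep (K : Int) (st : Int × List Int × PySem.Dict Int Bool) (sushi : Int) :
    Int × List Int × PySem.Dict Int Bool :=
  let c := st.1
  let q := st.2.1
  let e := st.2.2
  if e.contains sushi then st
  else
    let c := c + 1
    let q := q ++ [sushi]
    if (q.length : Int) > K then
      match q with
      | [] => (c, [], e.insert sushi true)          -- unreachable: q ends in sushi
      | toRemove :: rest => (c, rest, (e.erase toRemove).insert sushi true)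
    else (c, q, e.insert sushi true)

def getMaximumEatenDishCount (N : Int) (D : List Int) (K : Int) : Int :=
  (D.foldl (aStep K) (0, [], PySem.Dict.empty)).1

-- ===== PORT B =====
-- loop body of B: blocked iff last-eaten index exceeds eaten_count - K; else eat and stamp
def bStep (K : Int) (st : Int × PySem.Dict Int Int) (sushi : Int) : Int × PySem.Dict Int Int :=
  let blocked : Bool := match st.2.get? sushi with
    | some t => decide (t > st.1 - K)
    | none => false
  if blocked then st else (st.1 + 1, st.2.insert sushi (st.1 + 1))

def getMaximumEatenDishCount_alt (N : Int) (D : List Int) (K : Int) : Int :=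
  (D.foldl (bStep K) (0, PySem.Dict.empty)).1

-- ===== PRECONDITION & SPEC =====
-- Pre_ excludes exactly the inputs where A raises KeyError: K ≤ 0 with a nonempty D
-- (A then deletes the just-appended dish from `eaten` before recording it).
def Pre_getMaximumEatenDishCount (N : Int) (D : List Int) (K : Int) : Prop := 1 ≤ K ∨ D = []
instance (N : Int) (D : List Int) (K : Int) : Decidable (Pre_getMaximumEatenDishCount N D K) := by
  unfold Pre_getMaximumEatenDishCount; infer_instance

def pvWitness_getMaximumEatenDishCount : Int × List Int × Int := (3, [1, 2, 1], 2)

def Spec_getMaximumEatenDishCount (N : Int) (D : List Int) (K : Int) (out : Int) : Prop :=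
  out = getMaximumEatenDishCount_alt N D K
instance (N : Int) (D : List Int) (K : Int) (out : Int) : Decidable (Spec_getMaximumEatenDishCount N D K out) := by
  unfold Spec_getMaximumEatenDishCount; infer_instance

-- ===== CLAIM (what is proved, stated in full; the proofs are below) =====
def Claim_equal_getMaximumEatenDishCount : Prop := ∀ (N : Int) (D : List Int) (K : Int), Dom_getMaximumEatenDishCount N D K → Pre_getMaximumEatenDishCount N D K → Spec_getMaximumEatenDishCount N D K (getMaximumEatenDishCount N D K)

-- ===== LEMMAS AND PROOFS =====

-- last.get? maps the k-th queue element (0-based) to time t + k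
def TimesFrom (last : PySem.Dict Int Int) : Int → List Int → Prop
  | _, [] => True
  | t, x :: xs => last.get? x = some t ∧ TimesFrom last (t + 1) xs

theorem TimesFrom_congr (last last' : PySem.Dict Int Int) (t : Int) (q : List Int)
    (h : ∀ x ∈ q, last'.get? x = last.get? x) (ht : TimesFrom last t q) :
    TimesFrom last' t q := by
  induction q generalizing t with
  | nil => trivial
  | cons y ys ih =>
    obtain ⟨h1, h2⟩ := ht
    exact ⟨(h y (by simp)).trans h1, ih _ (fun x hx => h x (by simp [hx])) h2⟩

theorem TimesFrom_append (last : PySem.Dict Int Int) (t : Int) (q : List Int) (x : Int)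
    (ht : TimesFrom last t q) (hx : last.get? x = some (t + q.length)) :
    TimesFrom last t (q ++ [x]) := by
  induction q generalizing t with
  | nil => exact ⟨by simpa using hx, trivial⟩
    -- placeholder
  | cons y ys ih =>
    obtain ⟨h1, h2⟩ := ht
    exact ⟨h1, ih _ h2 (by rw [hx]; congr 1; simp only [List.length_cons]; push_cast; ring)⟩

theorem TimesFrom_mem (last : PySem.Dict Int Int) (t : Int) (q : List Int) (x : Int)
    (ht : TimesFrom last t q) (hx : x ∈ q) :
    ∃ s, last.get? x = some s ∧ t ≤ s ∧ s < t + q.length := by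
  induction q generalizing t with
  | nil => simp at hx
  | cons y ys ih =>
    obtain ⟨h1, h2⟩ := ht
    rcases List.mem_cons.mp hx with rfl | hx'
    · exact ⟨t, h1, le_refl _, by simp only [List.length_cons]; push_cast; omega⟩
    · obtain ⟨s, hs1, hs2, hs3⟩ := ih _ h2 hx'
      exact ⟨s, hs1, by omega, by simp at hs3 ⊢; omega⟩

theorem keys_erase_cons (e : PySem.Dict Int Bool) (h : Int) (rest : List Int)
    (hk : e.keys = h :: rest) (hnd : (h :: rest).Nodup) :
    (e.erase h).keys = rest := by
  have hnotin : h ∉ rest := (List.nodup_cons.mp hnd).1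
  rcases e with ⟨items⟩
  simp only [PySem.Dict.keys] at hk
  simp only [PySem.Dict.erase, PySem.Dict.keys]
  rcases items with _ | ⟨⟨k, v⟩, tl⟩
  · simp at hk
  · simp only [List.map_cons, List.cons.injEq] at hk
    obtain ⟨hk1, htl⟩ := hk
    subst hk1
    simp only [List.filter_cons]
    simp only [beq_self_eq_true, Bool.not_true, Bool.false_eq_true, if_false]
    rw [← htl]
    apply congrArg
    apply List.filter_eq_self.mpr
    intro p hp
    have hpr : p.1 ∈ rest := htl ▸ List.mem_map_of_mem hp
    simp only [Bool.not_eq_eq_eq_not, Bool.not_true, beq_eq_false_iff_ne]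
    intro hc; exact hnotin (hc ▸ hpr)

-- the simulation invariant between A's state (c, q, e) and B's state (c, last)
def SimInv (K c : Int) (q : List Int) (e : PySem.Dict Int Bool) (last : PySem.Dict Int Int) : Prop :=
  e.keys = q ∧ q.Nodup ∧ (q.length : Int) = min c K ∧ 0 ≤ c ∧
  TimesFrom last (c - q.length + 1) q ∧
  (∀ x t, x ∉ q → last.get? x = some t → t ≤ c - K)

theorem fold_eq (K : Int) (hK : 1 ≤ K) (D : List Int) :
    ∀ (c : Int) (q : List Int) (e : PySem.Dict Int Bool) (last : PySem.Dict Int Int),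
      SimInv K c q e last →
      (D.foldl (aStep K) (c, q, e)).1 = (D.foldl (bStep K) (c, last)).1 := by
  induction D with
  | nil => intro c q e last _; rfl
  | cons x xs ih =>
    intro c q e last hSim
    obtain ⟨hkeys, hnd, hlen, hc, htimes, hout⟩ := hSim
    simp only [List.foldl_cons]
    by_cases hmem : x ∈ q
    · -- A skips; B is blocked
      have hcont : e.contains x = true :=
        (PySem.Dict.contains_iff_mem_keys e x).mpr (hkeys ▸ hmem)
      have hA : aStep K (c, q, e) x = (c, q, e) := by
        simp [aStep, hcont]
      obtain ⟨s, hs1, hs2, hs3⟩ := TimesFrom_mem last _ q x htimes hmem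
      have hblock : s > c - K := by
        have hqK : (q.length : Int) ≤ K := by omega
        omega
      have hB : bStep K (c, last) x = (c, last) := by
        simp [bStep, hs1, hblock]
      rw [hA, hB]
      exact ih c q e last ⟨hkeys, hnd, hlen, hc, htimes, hout⟩
    · -- A eats; B is not blocked and eats
      have hcont : e.contains x = false := by
        by_contra hcf
        have := (PySem.Dict.contains_iff_mem_keys e x).mp (by simpa using hcf)
        exact hmem (hkeys ▸ this)
      have hBget : ∀ t, last.get? x = some t → t ≤ c - K := fun t => hout x t hmem
      have hB : bStep K (c, last) x = (c + 1, last.insert x (c + 1)) := by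
        rcases hg : last.get? x with _ | t
        · simp [bStep, hg]
        · have := hBget t hg
          have : ¬ (t > c - K) := by omega
          simp [bStep, hg, this]
      have hcongr : ∀ y ∈ q, (last.insert x (c + 1)).get? y = last.get? y := by
        intro y hy
        exact PySem.Dict.get?_insert_of_ne _ _ (fun hc' => hmem (hc' ▸ hy))
      by_cases hover : ((q.length : Int) + 1 > K)
      · -- eviction branch: |q| = K ≥ 1
        have hqK : (q.length : Int) = K := by omega
        rcases q with _ | ⟨h, rest⟩
        · simp at hqK; omega
        have hA : aStep K (c, h :: rest, e) x
            = (c + 1, rest ++ [x], (e.erase h).insert x true) := by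
          have hlen' : ((((h :: rest) ++ [x]).length : Int) > K) := by
            simp at hqK ⊢; omega
          simp only [aStep, hcont, Bool.false_eq_true, if_false]
          simp only [List.cons_append]
          rw [if_pos (by simpa using hlen')]
        rw [hA, hB]
        apply ih
        obtain ⟨hth, htrest⟩ := htimes
        have hhnotrest : h ∉ rest := (List.nodup_cons.mp hnd).1
        have hxne : x ≠ h := fun hc' => hmem (hc' ▸ List.mem_cons_self ..)
        refine ⟨?_, ?_, ?_, by omega, ?_, ?_⟩
        · -- keys
          have hek : (e.erase h).keys = rest := keys_erase_cons e h rest hkeys hnd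
          have : (e.erase h).contains x = false := by
            by_contra hcf
            have := (PySem.Dict.contains_iff_mem_keys _ x).mp (by simpa using hcf)
            exact hmem (by simp [hek ▸ this])
          rw [PySem.Dict.keys_insert_of_not_contains _ _ this, hek]
        · -- nodup
          have hrnd : rest.Nodup := (List.nodup_cons.mp hnd).2
          have hxrest : x ∉ rest := fun hm => hmem (List.mem_cons_of_mem _ hm)
          simp [List.nodup_append, hrnd, hxrest]
          exact fun a ha hax => hxrest (hax ▸ ha)
        · simp at hlen hqK ⊢; omega
        · -- times: new base = (c+1) - K + 1
          have hbase : (c + 1) - ((rest ++ [x]).length : Int) + 1 = (c - (rest.length + 1) + 1) + 1 := by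
            simp; ring
          rw [hbase]
          apply TimesFrom_append
          · exact TimesFrom_congr last _ _ rest (fun y hy => hcongr y (by simp [hy])) htrest
          · rw [PySem.Dict.get?_insert_self]
            congr 1
            simp at hqK ⊢; omega
        · -- outside window
          intro y t hy hget
          by_cases hyh : y = h
          · subst hyh
            have : (last.insert x (c+1)).get? y = last.get? y :=
              PySem.Dict.get?_insert_of_ne _ _ (fun hc' => hxne hc'.symm)
            rw [this, hth] at hget
            have ht' : c - ↑(y :: rest).length + 1 = t := by injection hget
            simp only [List.length_cons] at ht' hqK
            push_cast at ht' hqK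
            omega
          · have hyx : y ≠ x := by
              intro hc'; subst hc'
              rw [PySem.Dict.get?_insert_self] at hget
              simp at hy
            rw [PySem.Dict.get?_insert_of_ne _ _ hyx] at hget
            have : y ∉ h :: rest := by
              simp at hy ⊢
              exact ⟨hyh, hy.1⟩
            have := hout y t this hget
            omega
      · -- no eviction: |q| < K
        have hA : aStep K (c, q, e) x = (c + 1, q ++ [x], e.insert x true) := by
          simp only [aStep, hcont, Bool.false_eq_true, if_false]
          rw [if_neg (by push_neg; simp; omega)]
        rw [hA, hB]
        apply ih
        refine ⟨?_, ?_, ?_, by omega, ?_, ?_⟩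
        · rw [PySem.Dict.keys_insert_of_not_contains _ _ hcont, hkeys]
        · have hxq : x ∉ q := hmem
          simp [List.nodup_append, hnd, hxq]
          exact fun a ha hax => hxq (hax ▸ ha)
        · simp at hlen ⊢; omega
        · have hbase : (c + 1) - ((q ++ [x]).length : Int) + 1 = c - q.length + 1 := by
            simp only [List.length_append, List.length_cons, List.length_nil]; push_cast; ring
          rw [hbase]
          apply TimesFrom_append
          · exact TimesFrom_congr last _ _ q hcongr htimes
          · rw [PySem.Dict.get?_insert_self]; congr 1; omega
        · intro y t hy hget
          have hyx : y ≠ x := by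
            intro hc'; subst hc'
            rw [PySem.Dict.get?_insert_self] at hget
            simp at hy
          rw [PySem.Dict.get?_insert_of_ne _ _ hyx] at hget
          have : y ∉ q := fun hc' => hy (by simp [hc'])
          have := hout y t this hget
          omega

-- ===== VERDICT (by name: the statement is the Claim_ definition above) =====
theorem getMaximumEatenDishCount_spec : Claim_equal_getMaximumEatenDishCount := by
  unfold Claim_equal_getMaximumEatenDishCount
  intro N D K _ hPre
  unfold Spec_getMaximumEatenDishCount getMaximumEatenDishCount getMaximumEatenDishCount_alt
  rcases hPre with hK | rfl
  · exact fold_eq K hK D 0 [] PySem.Dict.empty PySem.Dict.empty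
      ⟨rfl, List.nodup_nil, by simp; omega, le_refl _, trivial, by intro x t _ hg; simp [PySem.Dict.get?_empty] at hg⟩
  · rfl
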